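-- pv_equiv track=rewrite | github.com/TianhaoW/RLMath | tests/no3il_env_unit_tests.py | HJSW_2p_construction
-- ===== SOURCE A (Python) =====
-- def HJSW_2p_construction(p, k=1):
--     points = []
--     # Use integer division for half intervals
--     half_p = (p - 1) // 2
--     half_p_plus = (p + 1) // 2
--
--     # Loop over x in extended range, with shifted origin to avoid floats
--     for x in range(-half_p, p + half_p + 1):
--         for y in range(2 * p):
--             if (x * y) % p != k:
--                 continue
--
--             # Check which block it falls into
--             if (
--                 # A blocks
--                 (0 * p < x <= 0 * p + half_p and 1 * p + half_p_plus <= y < 2 * p) or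
--                 (1 * p < x <= 1 * p + half_p and 0 * p + half_p_plus <= y < 1 * p) or
--                 (1 * p < x <= 1 * p + half_p and 1 * p + half_p_plus <= y < 2 * p)
--             ):
--                 points.append((x+half_p, y))
--                 continue
--
--             if (
--                 # B blocks
--                 (0 * p + half_p_plus <= x < 1 * p and 1 * p + half_p_plus <= y < 2 * p) or
--                 (-1 * p + half_p_plus <= x < 0 * p and 0 * p + half_p_plus <= y < 1 * p) or
--                 (-1 * p + half_p_plus <= x < 0 * p and 1 * p + half_p_plus <= y < 2 * p)
--             ):
--                 points.append((x+half_p, y))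
--                 continue
--
--             if (
--                 # C blocks
--                 (0 * p < x <= 0 * p + half_p and 0 * p < y <= 0 * p + half_p) or
--                 (1 * p < x <= 1 * p + half_p and 0 * p < y <= 0 * p + half_p) or
--                 (1 * p < x <= 1 * p + half_p and 1 * p < y <= 1 * p + half_p)
--             ):
--                 points.append((x+half_p, y))
--                 continue
--
--             if (
--                 # D blocks
--                 (0 * p + half_p_plus <= x < 1 * p and 0 * p < y <= 0 * p + half_p) or
--                 (-1 * p + half_p_plus <= x < 0 * p and 0 * p < y <= 0 * p + half_p) or
--                 (-1 * p + half_p_plus <= x < 0 * p and 1 * p < y <= 1 * p + half_p)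
--             ):
--                 points.append((x+ half_p, y))
--
--     return points
-- ===== SOURCE B (Python) =====
-- def _in_blocks(p, half, half_plus, x, y):
--     # union of the twelve blocks, grouped by x-strip
--     if 0 < x < p:
--         return 0 < y <= half or p + half_plus <= y < 2 * p
--     if p < x <= p + half or half_plus - p <= x < 0:
--         return (0 < y <= half or half_plus <= y < p
--                 or p < y <= p + half or p + half_plus <= y < 2 * p)
--     return False
--
--
-- def HJSW_2p_construction(p, k=1):
--     # y % p is in [0, p) for p > 0 and no y exists at all otherwise
--     if p <= 0 or k < 0 or k >= p:
--         return []
--     half = (p - 1) // 2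
--     half_plus = (p + 1) // 2
--     points = []
--     for x in range(-half, p + half + 1):
--         # extended Euclid: g = gcd(x, p) > 0 and x*su ≡ g (mod p)
--         g, u = x, p
--         su, sv = 1, 0
--         while u:
--             q = g // u
--             g, u = u, g - q * u
--             su, sv = sv, su - q * sv
--         if k % g:
--             continue  # x*y ≡ k (mod p) has no solution
--         step = p // g
--         y0 = (su * (k // g)) % step
--         for y in range(y0, 2 * p, step):
--             if _in_blocks(p, half, half_plus, x, y):
--                 points.append((x + half, y))
--     return points
-- ===== Notes on version B (the rewrite author's own statement) =====
-- stated objective: faster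
-- what changed: Instead of testing (x*y)%p==k for all 2p values of y per x, B solves x*y≡k (mod p) with extended Euclid per x and enumerates only the arithmetic progression of solutions y in [0,2p) (empty when gcd(x,p) does not divide k), with the twelve block tests merged into two x-strips.
import Mathlib
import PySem

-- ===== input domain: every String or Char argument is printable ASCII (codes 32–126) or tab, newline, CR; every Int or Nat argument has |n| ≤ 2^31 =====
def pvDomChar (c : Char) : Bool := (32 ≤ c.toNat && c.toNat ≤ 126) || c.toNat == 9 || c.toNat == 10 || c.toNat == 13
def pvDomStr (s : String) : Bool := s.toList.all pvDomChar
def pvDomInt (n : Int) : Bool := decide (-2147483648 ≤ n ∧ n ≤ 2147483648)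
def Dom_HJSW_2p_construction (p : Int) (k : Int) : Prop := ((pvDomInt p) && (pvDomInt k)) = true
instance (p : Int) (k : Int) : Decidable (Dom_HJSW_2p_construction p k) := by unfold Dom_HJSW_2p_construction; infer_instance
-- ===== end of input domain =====

-- B replaces A's inner scan of all y in [0,2p) by an extended-Euclid solution of x*y ≡ k (mod p): asymptotically faster.

-- ===== PORT A =====
def HJSW_2p_construction (p : Int) (k : Int) : List (Int × Int) :=
  let half_p := PySem.Int.floordiv (p - 1) 2
  let half_p_plus := PySem.Int.floordiv (p + 1) 2
  (PySem.List.pyRange (-half_p) (p + half_p + 1) 1).foldl (fun points x =>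
    (PySem.List.pyRange 0 (2 * p) 1).foldl (fun points y =>
      if PySem.Int.mod (x * y) p ≠ k then points
      else if (0 * p < x ∧ x ≤ 0 * p + half_p ∧ 1 * p + half_p_plus ≤ y ∧ y < 2 * p) ∨
              (1 * p < x ∧ x ≤ 1 * p + half_p ∧ 0 * p + half_p_plus ≤ y ∧ y < 1 * p) ∨
              (1 * p < x ∧ x ≤ 1 * p + half_p ∧ 1 * p + half_p_plus ≤ y ∧ y < 2 * p) then
        points ++ [(x + half_p, y)]
      else if (0 * p + half_p_plus ≤ x ∧ x < 1 * p ∧ 1 * p + half_p_plus ≤ y ∧ y < 2 * p) ∨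
              (-1 * p + half_p_plus ≤ x ∧ x < 0 * p ∧ 0 * p + half_p_plus ≤ y ∧ y < 1 * p) ∨
              (-1 * p + half_p_plus ≤ x ∧ x < 0 * p ∧ 1 * p + half_p_plus ≤ y ∧ y < 2 * p) then
        points ++ [(x + half_p, y)]
      else if (0 * p < x ∧ x ≤ 0 * p + half_p ∧ 0 * p < y ∧ y ≤ 0 * p + half_p) ∨
              (1 * p < x ∧ x ≤ 1 * p + half_p ∧ 0 * p < y ∧ y ≤ 0 * p + half_p) ∨
              (1 * p < x ∧ x ≤ 1 * p + half_p ∧ 1 * p < y ∧ y ≤ 1 * p + half_p) then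
        points ++ [(x + half_p, y)]
      else if (0 * p + half_p_plus ≤ x ∧ x < 1 * p ∧ 0 * p < y ∧ y ≤ 0 * p + half_p) ∨
              (-1 * p + half_p_plus ≤ x ∧ x < 0 * p ∧ 0 * p < y ∧ y ≤ 0 * p + half_p) ∨
              (-1 * p + half_p_plus ≤ x ∧ x < 0 * p ∧ 1 * p < y ∧ y ≤ 1 * p + half_p) then
        points ++ [(x + half_p, y)]
      else points) points) []

-- ===== PORT B =====
-- the 'while u:' extended-Euclid loop of Source B (state g, u, su, sv)
def pvEgcd (g u su sv : Int) : Int × Int :=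
  if h : u = 0 then (g, su)
  else pvEgcd u (PySem.Int.mod g u) sv (su - PySem.Int.floordiv g u * sv)
termination_by u.natAbs
decreasing_by
  rcases lt_trichotomy u 0 with hu | hu | hu
  · have h1 := PySem.Int.mod_neg_bounds g hu; omega
  · exact absurd hu h
  · have h1 := PySem.Int.mod_nonneg g hu
    have h2 := PySem.Int.mod_lt g hu
    omega

-- Source B's _in_blocks helper
def pvInBlocks (p half half_plus x y : Int) : Bool :=
  if 0 < x ∧ x < p then
    decide ((0 < y ∧ y ≤ half) ∨ (p + half_plus ≤ y ∧ y < 2 * p))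
  else if (p < x ∧ x ≤ p + half) ∨ (half_plus - p ≤ x ∧ x < 0) then
    decide ((0 < y ∧ y ≤ half) ∨ (half_plus ≤ y ∧ y < p) ∨
            (p < y ∧ y ≤ p + half) ∨ (p + half_plus ≤ y ∧ y < 2 * p))
  else false

def HJSW_2p_construction_alt (p : Int) (k : Int) : List (Int × Int) :=
  if p ≤ 0 ∨ k < 0 ∨ p ≤ k then []
  else
    let half := PySem.Int.floordiv (p - 1) 2
    let half_plus := PySem.Int.floordiv (p + 1) 2
    (PySem.List.pyRange (-half) (p + half + 1) 1).foldl (fun points x =>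
      let gu := pvEgcd x p 1 0
      if PySem.Int.mod k gu.1 ≠ 0 then points
      else
        let step := PySem.Int.floordiv p gu.1
        let y0 := PySem.Int.mod (gu.2 * PySem.Int.floordiv k gu.1) step
        (PySem.List.pyRange y0 (2 * p) step).foldl (fun points y =>
          if pvInBlocks p half half_plus x y then points ++ [(x + half, y)]
          else points) points) []

-- ===== PRECONDITION & SPEC =====
def Spec_HJSW_2p_construction (p : Int) (k : Int) (out : List (Int × Int)) : Prop := out = HJSW_2p_construction_alt p k
instance (p : Int) (k : Int) (out : List (Int × Int)) : Decidable (Spec_HJSW_2p_construction p k out) := by unfold Spec_HJSW_2p_construction; infer_instance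

-- ===== CLAIM (what is proved, stated in full; the proofs are below) =====
def Claim_equal_HJSW_2p_construction : Prop := ∀ (p : Int) (k : Int), Dom_HJSW_2p_construction p k → Spec_HJSW_2p_construction p k (HJSW_2p_construction p k)

-- ===== LEMMAS AND PROOFS =====

-- A's twelve block conditions, verbatim, as one Bool test (proof-side only)
def qABlocks (p half_p half_p_plus x y : Int) : Bool :=
  decide (
    ((0 * p < x ∧ x ≤ 0 * p + half_p ∧ 1 * p + half_p_plus ≤ y ∧ y < 2 * p) ∨
     (1 * p < x ∧ x ≤ 1 * p + half_p ∧ 0 * p + half_p_plus ≤ y ∧ y < 1 * p) ∨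
     (1 * p < x ∧ x ≤ 1 * p + half_p ∧ 1 * p + half_p_plus ≤ y ∧ y < 2 * p)) ∨
    ((0 * p + half_p_plus ≤ x ∧ x < 1 * p ∧ 1 * p + half_p_plus ≤ y ∧ y < 2 * p) ∨
     (-1 * p + half_p_plus ≤ x ∧ x < 0 * p ∧ 0 * p + half_p_plus ≤ y ∧ y < 1 * p) ∨
     (-1 * p + half_p_plus ≤ x ∧ x < 0 * p ∧ 1 * p + half_p_plus ≤ y ∧ y < 2 * p)) ∨
    ((0 * p < x ∧ x ≤ 0 * p + half_p ∧ 0 * p < y ∧ y ≤ 0 * p + half_p) ∨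
     (1 * p < x ∧ x ≤ 1 * p + half_p ∧ 0 * p < y ∧ y ≤ 0 * p + half_p) ∨
     (1 * p < x ∧ x ≤ 1 * p + half_p ∧ 1 * p < y ∧ y ≤ 1 * p + half_p)) ∨
    ((0 * p + half_p_plus ≤ x ∧ x < 1 * p ∧ 0 * p < y ∧ y ≤ 0 * p + half_p) ∨
     (-1 * p + half_p_plus ≤ x ∧ x < 0 * p ∧ 0 * p < y ∧ y ≤ 0 * p + half_p) ∨
     (-1 * p + half_p_plus ≤ x ∧ x < 0 * p ∧ 1 * p < y ∧ y ≤ 1 * p + half_p)))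

-- B's two-strip block test agrees with A's twelve blocks
set_option maxHeartbeats 1000000 in
lemma pvBlocks_iff (p half half_plus x y : Int) (hp : 0 < p)
    (hh : half = (p - 1) / 2) (hhp : half_plus = (p + 1) / 2) :
    pvInBlocks p half half_plus x y = true ↔ qABlocks p half half_plus x y = true := by
  simp only [pvInBlocks, qABlocks]
  split_ifs with h1 h2 <;> simp only [decide_eq_true_eq, Bool.false_eq_true, false_iff]
  · constructor
    · intro h
      by_cases hx : x ≤ half
      · rcases h with h | h
        · exact Or.inr (Or.inr (Or.inl (Or.inl (by omega))))
        · exact Or.inl (Or.inl (by omega))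
      · rcases h with h | h
        · exact Or.inr (Or.inr (Or.inr (Or.inl (by omega))))
        · exact Or.inr (Or.inl (Or.inl (by omega)))
    · intro h
      rcases h with (h | h | h) | (h | h | h) | (h | h | h) | (h | h | h) <;> omega
  · constructor
    · intro h
      rcases h2 with hx | hx
      · rcases h with h | h | h | h
        · exact Or.inr (Or.inr (Or.inl (Or.inr (Or.inl (by omega)))))
        · exact Or.inl (Or.inr (Or.inl (by omega)))
        · exact Or.inr (Or.inr (Or.inl (Or.inr (Or.inr (by omega)))))
        · exact Or.inl (Or.inr (Or.inr (by omega)))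
      · rcases h with h | h | h | h
        · exact Or.inr (Or.inr (Or.inr (Or.inr (Or.inl (by omega)))))
        · exact Or.inr (Or.inl (Or.inr (Or.inl (by omega))))
        · exact Or.inr (Or.inr (Or.inr (Or.inr (Or.inr (by omega)))))
        · exact Or.inr (Or.inl (Or.inr (Or.inr (by omega))))
    · intro h
      rcases h with (h | h | h) | (h | h | h) | (h | h | h) | (h | h | h) <;> omega
  · intro h
    rcases h with (h | h | h) | (h | h | h) | (h | h | h) | (h | h | h) <;> omega

lemma pvEgcd_spec (a b : Int) (g u su sv : Int) :
    b ∣ (g - a * su) → b ∣ (u - a * sv) →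
    (pvEgcd g u su sv).1.natAbs = Int.gcd g u ∧
      b ∣ ((pvEgcd g u su sv).1 - a * (pvEgcd g u su sv).2) := by
  induction g, u, su, sv using pvEgcd.induct with
  | case1 g su sv =>
    intro h1 _
    rw [pvEgcd]
    simp [h1]
  | case2 g u su sv hu ih =>
    intro h1 h2
    have hmod : PySem.Int.mod g u = g - PySem.Int.floordiv g u * u := by
      have := PySem.Int.floordiv_mul_add_mod g u; omega
    have hd : b ∣ (PySem.Int.mod g u - a * (su - PySem.Int.floordiv g u * sv)) := by
      have h3 : PySem.Int.mod g u - a * (su - PySem.Int.floordiv g u * sv)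
          = (g - a * su) - PySem.Int.floordiv g u * (u - a * sv) := by rw [hmod]; ring
      rw [h3]
      exact dvd_sub h1 (Dvd.dvd.mul_left h2 _)
    have hgcd : Int.gcd u (PySem.Int.mod g u) = Int.gcd g u := by
      rw [hmod]
      have h3 : g - PySem.Int.floordiv g u * u = g + (-(PySem.Int.floordiv g u)) * u := by ring
      rw [h3, Int.gcd_add_mul_right_right, Int.gcd_comm]
    obtain ⟨ih1, ih2⟩ := ih h2 hd
    rw [pvEgcd, dif_neg hu]
    exact ⟨by rw [ih1, hgcd], ih2⟩

lemma pvEgcd_pos (g u su sv : Int) (hu : 0 < u) : 0 < (pvEgcd g u su sv).1 := by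
  induction g, u, su, sv using pvEgcd.induct with
  | case1 g su sv => omega
  | case2 g u su sv h ih =>
    rw [pvEgcd, dif_neg h]
    by_cases hm : PySem.Int.mod g u = 0
    · rw [hm, pvEgcd]; simpa using hu
    · have h1 := PySem.Int.mod_nonneg g hu
      exact ih (by omega)

lemma pvSolIff (p k x G U : Int) (hp : 0 < p) (hk0 : 0 ≤ k) (hkp : k < p)
    (hGgcd : G = (Int.gcd x p : Int)) (hGpos : 0 < G) (hU : p ∣ G - x * U) (y : Int) :
    PySem.Int.mod (x * y) p = k ↔
      (G ∣ k ∧ (p / G) ∣ (y - (U * (k / G)) % (p / G))) := by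
  have hGp : G ∣ p := hGgcd ▸ Int.gcd_dvd_right x p
  have hGx : G ∣ x := hGgcd ▸ Int.gcd_dvd_left x p
  have hps : G * (p / G) = p := Int.mul_ediv_cancel' hGp
  have hstep : 0 < p / G := by
    rcases lt_trichotomy (p / G) 0 with h | h | h
    · nlinarith
    · rw [h] at hps; omega
    · exact h
  have hx' : G * (x / G) = x := Int.mul_ediv_cancel' hGx
  have hy0c : (p / G) ∣ (U * (k / G)) - (U * (k / G)) % (p / G) := by
    rw [Int.emod_def]; exact ⟨(U * (k / G)) / (p / G), by ring⟩
  have hlhs : PySem.Int.mod (x * y) p = k ↔ p ∣ (x * y - k) := by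
    rw [PySem.Int.mod_eq_emod_of_pos hp]
    constructor
    · intro h
      have : (x * y) % p = k % p := by rw [h, Int.emod_eq_of_lt hk0 hkp]
      exact dvd_sub_comm.mp (Int.modEq_iff_dvd.mp this)
    · intro h
      have : (x * y) % p = k % p := Int.modEq_iff_dvd.mpr (dvd_sub_comm.mp h)
      rw [this, Int.emod_eq_of_lt hk0 hkp]
  have hxc : G ∣ k → p ∣ x * (U * (k / G)) - k := by
    intro hGk
    have hk' : G * (k / G) = k := Int.mul_ediv_cancel' hGk
    have h7 : p ∣ (x * U - G) * (k / G) := by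
      have h8 : (x * U - G) * (k / G) = -((G - x * U) * (k / G)) := by ring
      rw [h8]; exact dvd_neg.mpr (hU.mul_right (k / G))
    have h9 : x * (U * (k / G)) - k = (x * U - G) * (k / G) + (G * (k / G) - k) := by ring
    rw [h9, hk']; simpa using h7
  rw [hlhs]
  constructor
  · intro h
    have hGk : G ∣ k := by
      have h3 : G ∣ x * y - k := dvd_trans hGp h
      have h4 : G ∣ x * y := Dvd.dvd.mul_right hGx y
      have h5 : k = x * y - (x * y - k) := by ring
      rw [h5]; exact dvd_sub h4 h3
    refine ⟨hGk, ?_⟩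
    have hxyc : p ∣ x * (y - U * (k / G)) := by
      have h5 : x * (y - U * (k / G)) = (x * y - k) - (x * (U * (k / G)) - k) := by ring
      rw [h5]; exact dvd_sub h (hxc hGk)
    have hcanc : (p / G) ∣ (x / G) * (y - U * (k / G)) := by
      have h5 : G * (p / G) ∣ G * ((x / G) * (y - U * (k / G))) := by
        rw [hps]
        have h10 : G * ((x / G) * (y - U * (k / G))) = (G * (x / G)) * (y - U * (k / G)) := by ring
        rw [h10, hx']; exact hxyc
      exact (mul_dvd_mul_iff_left (by omega : G ≠ 0)).mp h5
    have hcop : IsCoprime (x / G) (p / G) := by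
      rw [Int.isCoprime_iff_gcd_eq_one]
      have := Int.gcd_div_gcd_div_gcd (i := x) (j := p) (by omega)
      rwa [← hGgcd] at this
    have h6 : (p / G) ∣ (y - U * (k / G)) :=
      (hcop.symm).dvd_of_dvd_mul_left (by rw [mul_comm] at hcanc ⊢; exact hcanc)
    have h11 : y - (U * (k / G)) % (p / G)
        = (y - U * (k / G)) + ((U * (k / G)) - (U * (k / G)) % (p / G)) := by ring
    rw [h11]; exact dvd_add h6 hy0c
  · rintro ⟨hGk, hd⟩
    have h6 : (p / G) ∣ (y - U * (k / G)) := by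
      have h11 : y - U * (k / G)
          = (y - (U * (k / G)) % (p / G)) - ((U * (k / G)) - (U * (k / G)) % (p / G)) := by ring
      rw [h11]; exact dvd_sub hd hy0c
    have hxyc : p ∣ x * (y - U * (k / G)) := by
      obtain ⟨m, hm⟩ := h6
      refine ⟨(x / G) * m, ?_⟩
      calc x * (y - U * (k / G)) = x * (p / G * m) := by rw [hm]
        _ = (G * (x / G)) * (p / G * m) := by rw [hx']
        _ = (G * (p / G)) * ((x / G) * m) := by ring
        _ = p * ((x / G) * m) := by rw [hps]
    have h12 : x * y - k = x * (y - U * (k / G)) + (x * (U * (k / G)) - k) := by ring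
    rw [h12]; exact dvd_add hxyc (hxc hGk)

-- A as a flatMap of per-x filtered scans over all y in [0, 2p)
set_option maxHeartbeats 2000000 in
lemma pvA_flat (p k : Int) :
    HJSW_2p_construction p k =
    (PySem.List.pyRange (-(PySem.Int.floordiv (p - 1) 2)) (p + PySem.Int.floordiv (p - 1) 2 + 1) 1).flatMap
      (fun x =>
        ((PySem.List.pyRange 0 (2 * p) 1).filter
            (fun y => decide (PySem.Int.mod (x * y) p = k) &&
              qABlocks p (PySem.Int.floordiv (p - 1) 2) (PySem.Int.floordiv (p + 1) 2) x y)).map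
          (fun y => (x + PySem.Int.floordiv (p - 1) 2, y))) := by
  unfold HJSW_2p_construction
  set half := PySem.Int.floordiv (p - 1) 2 with hhalf
  set half_plus := PySem.Int.floordiv (p + 1) 2 with hhalfp
  have hinner : ∀ (x : Int) (points : List (Int × Int)),
      (PySem.List.pyRange 0 (2 * p) 1).foldl (fun points y =>
        if PySem.Int.mod (x * y) p ≠ k then points
        else if (0 * p < x ∧ x ≤ 0 * p + half ∧ 1 * p + half_plus ≤ y ∧ y < 2 * p) ∨
                (1 * p < x ∧ x ≤ 1 * p + half ∧ 0 * p + half_plus ≤ y ∧ y < 1 * p) ∨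
                (1 * p < x ∧ x ≤ 1 * p + half ∧ 1 * p + half_plus ≤ y ∧ y < 2 * p) then
          points ++ [(x + half, y)]
        else if (0 * p + half_plus ≤ x ∧ x < 1 * p ∧ 1 * p + half_plus ≤ y ∧ y < 2 * p) ∨
                (-1 * p + half_plus ≤ x ∧ x < 0 * p ∧ 0 * p + half_plus ≤ y ∧ y < 1 * p) ∨
                (-1 * p + half_plus ≤ x ∧ x < 0 * p ∧ 1 * p + half_plus ≤ y ∧ y < 2 * p) then
          points ++ [(x + half, y)]
        else if (0 * p < x ∧ x ≤ 0 * p + half ∧ 0 * p < y ∧ y ≤ 0 * p + half) ∨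
                (1 * p < x ∧ x ≤ 1 * p + half ∧ 0 * p < y ∧ y ≤ 0 * p + half) ∨
                (1 * p < x ∧ x ≤ 1 * p + half ∧ 1 * p < y ∧ y ≤ 1 * p + half) then
          points ++ [(x + half, y)]
        else if (0 * p + half_plus ≤ x ∧ x < 1 * p ∧ 0 * p < y ∧ y ≤ 0 * p + half) ∨
                (-1 * p + half_plus ≤ x ∧ x < 0 * p ∧ 0 * p < y ∧ y ≤ 0 * p + half) ∨
                (-1 * p + half_plus ≤ x ∧ x < 0 * p ∧ 1 * p < y ∧ y ≤ 1 * p + half) then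
          points ++ [(x + half, y)]
        else points) points
      = points ++ ((PySem.List.pyRange 0 (2 * p) 1).filter
            (fun y => decide (PySem.Int.mod (x * y) p = k) && qABlocks p half half_plus x y)).map
          (fun y => (x + half, y)) := by
    intro x points
    rw [← PySem.List.foldl_append_if
      (fun y => decide (PySem.Int.mod (x * y) p = k) && qABlocks p half half_plus x y)
      (fun y => (x + half, y)) (PySem.List.pyRange 0 (2 * p) 1) points]
    apply PySem.List.foldl_congr_mem
    intro acc y _
    by_cases hm : PySem.Int.mod (x * y) p = k
    · rw [if_neg (not_not_intro hm)]
      by_cases h1 : (0 * p < x ∧ x ≤ 0 * p + half ∧ 1 * p + half_plus ≤ y ∧ y < 2 * p) ∨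
          (1 * p < x ∧ x ≤ 1 * p + half ∧ 0 * p + half_plus ≤ y ∧ y < 1 * p) ∨
          (1 * p < x ∧ x ≤ 1 * p + half ∧ 1 * p + half_plus ≤ y ∧ y < 2 * p)
      · rw [if_pos h1, if_pos (show _ = true by
          simp only [qABlocks, Bool.and_eq_true, decide_eq_true_eq]
          exact ⟨hm, Or.inl h1⟩)]
      · by_cases h2 : (0 * p + half_plus ≤ x ∧ x < 1 * p ∧ 1 * p + half_plus ≤ y ∧ y < 2 * p) ∨
            (-1 * p + half_plus ≤ x ∧ x < 0 * p ∧ 0 * p + half_plus ≤ y ∧ y < 1 * p) ∨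
            (-1 * p + half_plus ≤ x ∧ x < 0 * p ∧ 1 * p + half_plus ≤ y ∧ y < 2 * p)
        · rw [if_neg h1, if_pos h2, if_pos (show _ = true by
            simp only [qABlocks, Bool.and_eq_true, decide_eq_true_eq]
            exact ⟨hm, Or.inr (Or.inl h2)⟩)]
        · by_cases h3 : (0 * p < x ∧ x ≤ 0 * p + half ∧ 0 * p < y ∧ y ≤ 0 * p + half) ∨
              (1 * p < x ∧ x ≤ 1 * p + half ∧ 0 * p < y ∧ y ≤ 0 * p + half) ∨
              (1 * p < x ∧ x ≤ 1 * p + half ∧ 1 * p < y ∧ y ≤ 1 * p + half)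
          · rw [if_neg h1, if_neg h2, if_pos h3, if_pos (show _ = true by
              simp only [qABlocks, Bool.and_eq_true, decide_eq_true_eq]
              exact ⟨hm, Or.inr (Or.inr (Or.inl h3))⟩)]
          · by_cases h4 : (0 * p + half_plus ≤ x ∧ x < 1 * p ∧ 0 * p < y ∧ y ≤ 0 * p + half) ∨
                (-1 * p + half_plus ≤ x ∧ x < 0 * p ∧ 0 * p < y ∧ y ≤ 0 * p + half) ∨
                (-1 * p + half_plus ≤ x ∧ x < 0 * p ∧ 1 * p < y ∧ y ≤ 1 * p + half)
            · rw [if_neg h1, if_neg h2, if_neg h3, if_pos h4, if_pos (show _ = true by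
                simp only [qABlocks, Bool.and_eq_true, decide_eq_true_eq]
                exact ⟨hm, Or.inr (Or.inr (Or.inr h4))⟩)]
            · rw [if_neg h1, if_neg h2, if_neg h3, if_neg h4, if_neg (show ¬ _ = true by
                simp only [qABlocks, Bool.and_eq_true, decide_eq_true_eq]
                rintro ⟨-, h | h | h | h⟩ <;> contradiction)]
    · rw [if_pos hm, if_neg (show ¬ _ = true by
        simp only [qABlocks, Bool.and_eq_true, decide_eq_true_eq]
        rintro ⟨h, -⟩; exact hm h)]
  calc (PySem.List.pyRange (-half) (p + half + 1) 1).foldl _ ([] : List (Int × Int))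
      = (PySem.List.pyRange (-half) (p + half + 1) 1).foldl (fun points x =>
          points ++ ((PySem.List.pyRange 0 (2 * p) 1).filter
            (fun y => decide (PySem.Int.mod (x * y) p = k) && qABlocks p half half_plus x y)).map
          (fun y => (x + half, y))) [] := by
        apply PySem.List.foldl_congr_mem
        intro acc x _
        exact hinner x acc
    _ = _ := by
        rw [PySem.List.foldl_append_eq_flatMap, List.nil_append]

-- B as a flatMap of per-x solution scans
set_option maxHeartbeats 1000000 in
lemma pvB_flat (p k : Int) (h : ¬(p ≤ 0 ∨ k < 0 ∨ p ≤ k)) :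
    HJSW_2p_construction_alt p k =
    (PySem.List.pyRange (-(PySem.Int.floordiv (p - 1) 2)) (p + PySem.Int.floordiv (p - 1) 2 + 1) 1).flatMap
      (fun x =>
        if PySem.Int.mod k (pvEgcd x p 1 0).1 = 0 then
          ((PySem.List.pyRange
              (PySem.Int.mod ((pvEgcd x p 1 0).2 * PySem.Int.floordiv k (pvEgcd x p 1 0).1)
                (PySem.Int.floordiv p (pvEgcd x p 1 0).1))
              (2 * p) (PySem.Int.floordiv p (pvEgcd x p 1 0).1)).filter
            (fun y => pvInBlocks p (PySem.Int.floordiv (p - 1) 2) (PySem.Int.floordiv (p + 1) 2) x y)).map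
            (fun y => (x + PySem.Int.floordiv (p - 1) 2, y))
        else []) := by
  unfold HJSW_2p_construction_alt
  rw [if_neg h]
  set half := PySem.Int.floordiv (p - 1) 2 with hhalf
  set half_plus := PySem.Int.floordiv (p + 1) 2 with hhalfp
  calc _ = (PySem.List.pyRange (-half) (p + half + 1) 1).foldl (fun points x =>
          points ++ (if PySem.Int.mod k (pvEgcd x p 1 0).1 = 0 then
            ((PySem.List.pyRange
                (PySem.Int.mod ((pvEgcd x p 1 0).2 * PySem.Int.floordiv k (pvEgcd x p 1 0).1)
                  (PySem.Int.floordiv p (pvEgcd x p 1 0).1))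
                (2 * p) (PySem.Int.floordiv p (pvEgcd x p 1 0).1)).filter
              (fun y => pvInBlocks p half half_plus x y)).map (fun y => (x + half, y))
          else [])) ([] : List (Int × Int)) := by
        apply PySem.List.foldl_congr_mem
        intro acc x _
        by_cases hm : PySem.Int.mod k (pvEgcd x p 1 0).1 = 0
        · rw [if_pos hm]
          simp only [hm, ne_eq, not_true_eq_false, if_false]
          rw [PySem.List.foldl_append_if (fun y => pvInBlocks p half half_plus x y)
            (fun y => (x + half, y))]
        · rw [if_neg hm]
          simp only [hm, ne_eq, not_false_eq_true, if_true, List.append_nil]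
    _ = _ := by
        rw [PySem.List.foldl_append_eq_flatMap, List.nil_append]

-- the per-x contribution of A equals that of B
set_option maxHeartbeats 2000000 in
lemma pvPerx (p k x : Int) (hp : 0 < p) (hk0 : 0 ≤ k) (hkp : k < p) :
    ((PySem.List.pyRange 0 (2 * p) 1).filter
        (fun y => decide (PySem.Int.mod (x * y) p = k) &&
          qABlocks p (PySem.Int.floordiv (p - 1) 2) (PySem.Int.floordiv (p + 1) 2) x y)).map
      (fun y => (x + PySem.Int.floordiv (p - 1) 2, y))
    = if PySem.Int.mod k (pvEgcd x p 1 0).1 = 0 then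
        ((PySem.List.pyRange
            (PySem.Int.mod ((pvEgcd x p 1 0).2 * PySem.Int.floordiv k (pvEgcd x p 1 0).1)
              (PySem.Int.floordiv p (pvEgcd x p 1 0).1))
            (2 * p) (PySem.Int.floordiv p (pvEgcd x p 1 0).1)).filter
          (fun y => pvInBlocks p (PySem.Int.floordiv (p - 1) 2) (PySem.Int.floordiv (p + 1) 2) x y)).map
          (fun y => (x + PySem.Int.floordiv (p - 1) 2, y))
      else [] := by
  obtain ⟨hnat, hU⟩ := pvEgcd_spec x p x p 1 0 (by simp) (by simp)
  have hGpos : 0 < (pvEgcd x p 1 0).1 := pvEgcd_pos x p 1 0 hp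
  set G := (pvEgcd x p 1 0).1 with hGdef
  set U := (pvEgcd x p 1 0).2 with hUdef
  have hGgcd : G = (Int.gcd x p : Int) := by omega
  have hGp : G ∣ p := hGgcd ▸ Int.gcd_dvd_right x p
  have hps : G * (p / G) = p := Int.mul_ediv_cancel' hGp
  have hstep : 0 < p / G := by
    rcases lt_trichotomy (p / G) 0 with h | h | h
    · nlinarith
    · rw [h] at hps; omega
    · exact h
  have hfd : PySem.Int.floordiv p G = p / G := PySem.Int.floordiv_eq_ediv_of_pos hGpos
  have hfk : PySem.Int.floordiv k G = k / G := PySem.Int.floordiv_eq_ediv_of_pos hGpos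
  have hhh : PySem.Int.floordiv (p - 1) 2 = (p - 1) / 2 :=
    PySem.Int.floordiv_eq_ediv_of_pos (by omega)
  have hhhp : PySem.Int.floordiv (p + 1) 2 = (p + 1) / 2 :=
    PySem.Int.floordiv_eq_ediv_of_pos (by omega)
  have hm0 : PySem.Int.mod (U * PySem.Int.floordiv k G) (PySem.Int.floordiv p G)
      = (U * (k / G)) % (p / G) := by
    rw [hfk, hfd, PySem.Int.mod_eq_emod_of_pos hstep]
  set y0 := (U * (k / G)) % (p / G) with hy0
  have hy00 : 0 ≤ y0 := Int.emod_nonneg _ (by omega)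
  have hy0s : y0 < p / G := Int.emod_lt_of_pos _ hstep
  have hbound : ∀ y : Int, (p / G) ∣ (y - y0) → 0 ≤ y → y0 ≤ y := by
    intro y hd h0
    by_contra hlt
    push_neg at hlt
    have h1 : (p / G) ∣ (y0 - y) := by
      have h2 : y0 - y = -(y - y0) := by ring
      rw [h2]; exact dvd_neg.mpr hd
    have h2 := Int.le_of_dvd (by omega) h1
    omega
  by_cases hGk : G ∣ k
  · rw [if_pos (by rw [PySem.Int.mod_eq_zero_iff_dvd]; exact hGk)]
    rw [hm0, hfd]
    have hpw2 : (PySem.List.pyRange y0 (2 * p) (p / G)).Pairwise (· < ·) := by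
      rw [PySem.List.pyRange_of_pos y0 (2 * p) hstep]
      refine List.Pairwise.map _ ?_ List.pairwise_lt_range
      intro a b hab
      have hab' : (a : Int) < b := by exact_mod_cast hab
      have := mul_lt_mul_of_pos_left hab' hstep
      omega
    congr 1
    apply List.Perm.eq_of_pairwise (le := fun a b : Int => a < b)
    · intro a b _ _ h1 h2; omega
    · exact List.Pairwise.filter _ (PySem.List.pairwise_lt_pyRange_one 0 (2 * p))
    · exact List.Pairwise.filter _ hpw2
    · rw [List.perm_ext_iff_of_nodup
        (((PySem.List.pairwise_lt_pyRange_one 0 (2 * p)).filter _).imp (fun h => ne_of_lt h))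
        ((hpw2.filter _).imp (fun h => ne_of_lt h))]
      intro y
      simp only [List.mem_filter, PySem.List.mem_pyRange_one,
        PySem.List.mem_pyRange_iff_of_pos hstep, Bool.and_eq_true, decide_eq_true_eq]
      rw [pvSolIff p k x G U hp hk0 hkp hGgcd hGpos hU y,
        ← pvBlocks_iff p _ _ x y hp hhh hhhp]
      constructor
      · rintro ⟨⟨hy1, hy2⟩, ⟨_, hdv⟩, hblk⟩
        exact ⟨⟨hbound y hdv hy1, hy2, hdv⟩, hblk⟩
      · rintro ⟨⟨hy1, hy2, hdv⟩, hblk⟩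
        exact ⟨⟨by omega, hy2⟩, ⟨hGk, hdv⟩, hblk⟩
  · rw [if_neg (by rw [PySem.Int.mod_eq_zero_iff_dvd]; exact hGk)]
    have hnil : (PySem.List.pyRange 0 (2 * p) 1).filter
        (fun y => decide (PySem.Int.mod (x * y) p = k) &&
          qABlocks p (PySem.Int.floordiv (p - 1) 2) (PySem.Int.floordiv (p + 1) 2) x y) = [] := by
      rw [List.filter_eq_nil_iff]
      intro y _
      simp only [Bool.and_eq_true, decide_eq_true_eq, not_and]
      intro hmk
      exact absurd ((pvSolIff p k x G U hp hk0 hkp hGgcd hGpos hU y).mp hmk).1 hGk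
    rw [hnil, List.map_nil]

-- ===== VERDICT (by name: the statement is the Claim_ definition above) =====
theorem HJSW_2p_construction_spec : Claim_equal_HJSW_2p_construction := by
  intro p k _
  unfold Spec_HJSW_2p_construction
  by_cases hg : p ≤ 0 ∨ k < 0 ∨ p ≤ k
  · have hB : HJSW_2p_construction_alt p k = [] := by
      unfold HJSW_2p_construction_alt; rw [if_pos hg]
    rw [hB, pvA_flat, List.flatMap_eq_nil_iff]
    intro x _
    by_cases hp : p ≤ 0
    · rw [PySem.List.pyRange_one_eq_nil (by omega : (2 : Int) * p ≤ 0)]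
      rfl
    · have hnil : (PySem.List.pyRange 0 (2 * p) 1).filter
          (fun y => decide (PySem.Int.mod (x * y) p = k) &&
            qABlocks p (PySem.Int.floordiv (p - 1) 2) (PySem.Int.floordiv (p + 1) 2) x y) = [] := by
        rw [List.filter_eq_nil_iff]
        intro y _
        simp only [Bool.and_eq_true, decide_eq_true_eq, not_and]
        intro hmk
        have h1 := PySem.Int.mod_nonneg (x * y) (by omega : (0 : Int) < p)
        have h2 := PySem.Int.mod_lt (x * y) (by omega : (0 : Int) < p)
        omega
      rw [hnil, List.map_nil]
  · push_neg at hg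
    obtain ⟨hp, hk0, hkp⟩ := hg
    rw [pvA_flat, pvB_flat p k (by push_neg; exact ⟨hp, hk0, hkp⟩)]
    apply List.flatMap_congr
    intro x _
    exact pvPerx p k x (by omega) hk0 (by omega)
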